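-- pv_equiv track=rewrite | github.com/Alintermans/Thesis | Experiments/ConstrainedParodieGenerator/SongUtils.py | divide_song_into_paragraphs
-- ===== SOURCE A (Python) =====
-- def divide_song_into_paragraphs(song):
--     paragraphs = []
--     current_paragraph = []
--     current_paragraph_name = ""
--     first_done = False
--     for line in song.split("\n"):
--         if line.startswith("["):
--             if first_done:
--                 paragraphs.append((current_paragraph_name, current_paragraph))
--                 current_paragraph = []
--             else:
--                 first_done = True
--             current_paragraph_name = line
--         elif line == '':
--                 continue
--         else:
--             current_paragraph.append(line)
--     paragraphs.append((current_paragraph_name, current_paragraph))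
--     result = []
--     for paragraph in paragraphs:
--         if not paragraph[0].startswith( "[ERROR]"):
--             result.append(paragraph)
--     return result
-- ===== SOURCE B (Python) =====
-- def divide_song_into_paragraphs(song):
--     # Recursive descent: parse(name, lines) consumes the non-empty body lines
--     # belonging to `name` up to the next header, then recurses on that header;
--     # the leading chunk (lines before any header) is merged into the first real
--     # paragraph afterwards.
--     def parse(name, lines):
--         body = []
--         while lines and not lines[0].startswith("["):
--             if lines[0]:
--                 body.append(lines[0])
--             lines = lines[1:]
--         if not lines:
--             return [(name, body)]
--         return [(name, body)] + parse(lines[0], lines[1:])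
--
--     paras = parse("", song.split("\n"))
--     if len(paras) > 1:
--         paras = [(paras[1][0], paras[0][1] + paras[1][1])] + paras[2:]
--     return [p for p in paras if not p[0].startswith("[ERROR]")]
-- ===== Notes on version B (the rewrite author's own statement) =====
-- stated objective: alternative
-- what changed: Replaces A's single forward fold with a first_done flag by a recursive-descent parser that consumes each paragraph body up to the next header and recurses, merging the pre-header chunk into the first real paragraph afterwards.
import Mathlib
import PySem

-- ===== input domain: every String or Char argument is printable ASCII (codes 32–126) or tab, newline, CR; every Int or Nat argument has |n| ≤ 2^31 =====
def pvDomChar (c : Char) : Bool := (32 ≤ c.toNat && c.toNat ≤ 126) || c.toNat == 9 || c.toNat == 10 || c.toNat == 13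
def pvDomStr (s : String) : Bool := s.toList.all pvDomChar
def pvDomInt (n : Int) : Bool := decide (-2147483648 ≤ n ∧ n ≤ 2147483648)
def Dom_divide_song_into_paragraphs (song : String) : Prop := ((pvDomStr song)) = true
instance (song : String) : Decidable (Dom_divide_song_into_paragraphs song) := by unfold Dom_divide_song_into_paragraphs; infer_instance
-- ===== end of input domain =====

-- B replaces A's forward fold (first_done flag + flush-on-header) by a recursive-descent
-- parser: each paragraph's body is consumed up to the next header, then the parser recurses
-- on that header; the pre-header chunk is merged into the first real paragraph afterwards
-- (alternative decomposition, same cost).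
-- s.split("\n") is ported as (PySem.Str.split? s "\n").getD [] — the separator is non-empty, so split? is always some.

-- ===== PORT A =====
-- loop state = (paragraphs, current_paragraph, current_paragraph_name, first_done)
def aStep (st : List (String × List String) × List String × String × Bool) (line : String) :
    List (String × List String) × List String × String × Bool :=
  match st with
  | (paragraphs, current, name, firstDone) =>
    if PySem.Str.startswith line "[" then
      if firstDone then (paragraphs ++ [(name, current)], [], line, true)
      else (paragraphs, current, line, true)
    else if line = "" then (paragraphs, current, name, firstDone)
    else (paragraphs, current ++ [line], name, firstDone)

-- the final 'paragraphs.append((current_paragraph_name, current_paragraph))'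
def aFin (st : List (String × List String) × List String × String × Bool) :
    List (String × List String) :=
  st.1 ++ [(st.2.2.1, st.2.1)]

def divide_song_into_paragraphs (song : String) : List (String × List String) :=
  (aFin (((PySem.Str.split? song "\n").getD []).foldl aStep ([], [], "", false))).foldl
    (fun result p => if !(PySem.Str.startswith p.1 "[ERROR]") then result ++ [p] else result) []

-- ===== PORT B =====
-- the inner 'while lines and not lines[0].startswith("["):' loop of parse
def bEat (body : List String) : List String → List String × List String
  | [] => (body, [])
  | l :: t =>
    if PySem.Str.startswith l "[" then (body, l :: t)
    else bEat (if l = "" then body else body ++ [l]) t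

theorem bEat_len (ls : List String) : ∀ body, ((bEat body ls).2).length ≤ ls.length := by
  induction ls with
  | nil => intro body; simp [bEat]
  | cons l t ih =>
    intro body
    rw [bEat]
    split
    · simp
    · exact le_trans (ih _) (by simp)

-- def parse(name, lines)
def bParse (name : String) (lines : List String) : List (String × List String) :=
  match h : bEat [] lines with
  | (body, []) => [(name, body)]
  | (body, hd :: t) => (name, body) :: bParse hd t
termination_by lines.length
decreasing_by
  have hle := bEat_len lines []
  rw [h] at hle
  simp at hle
  omega

-- 'if len(paras) > 1: paras = [(paras[1][0], paras[0][1] + paras[1][1])] + paras[2:]'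
def bMerge : List (String × List String) → List (String × List String)
  | p0 :: p1 :: t => (p1.1, p0.2 ++ p1.2) :: t
  | ps => ps

def divide_song_into_paragraphs_alt (song : String) : List (String × List String) :=
  (bMerge (bParse "" ((PySem.Str.split? song "\n").getD []))).filter
    (fun p => !(PySem.Str.startswith p.1 "[ERROR]"))

-- ===== PRECONDITION & SPEC =====
def Spec_divide_song_into_paragraphs (song : String) (out : List (String × List String)) : Prop := out = divide_song_into_paragraphs_alt song
instance (song : String) (out : List (String × List String)) : Decidable (Spec_divide_song_into_paragraphs song out) := by unfold Spec_divide_song_into_paragraphs; infer_instance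

-- ===== CLAIM (what is proved, stated in full; the proofs are below) =====
def Claim_equal_divide_song_into_paragraphs : Prop := ∀ (song : String), Dom_divide_song_into_paragraphs song → Spec_divide_song_into_paragraphs song (divide_song_into_paragraphs song)

-- ===== LEMMAS AND PROOFS =====

-- A's loop after the first header, written as structural recursion (proof spine).
def restF : List String → String → List String → List (String × List String)
  | [], n, c => [(n, c)]
  | l :: t, n, c =>
    if PySem.Chars.startswith l.toList ['['] then (n, c) :: restF t l []
    else if l = "" then restF t n c
    else restF t n (c ++ [l])

-- A's loop before the first header (proof spine).
def preF : List String → List String → List (String × List String)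
  | [], acc => [("", acc)]
  | l :: t, acc =>
    if PySem.Chars.startswith l.toList ['['] then restF t l acc
    else if l = "" then preF t acc
    else preF t (acc ++ [l])

theorem startswith_nil_bracket : PySem.Chars.startswith ([] : List Char) ['['] = false := by decide

theorem restF_head (t : List String) : ∀ n c, ∃ b r, restF t n c = (n, b) :: r := by
  induction t with
  | nil => intro n c; exact ⟨c, [], rfl⟩
  | cons l t ih =>
    intro n c
    by_cases h1 : PySem.Chars.startswith l.toList ['['] = true
    · exact ⟨c, restF t l [], by simp [restF, h1]⟩
    · by_cases h2 : l = ""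
      · obtain ⟨b, r, hr⟩ := ih n c
        exact ⟨b, r, by simp [restF, h2, startswith_nil_bracket, hr]⟩
      · obtain ⟨b, r, hr⟩ := ih n (c ++ [l])
        exact ⟨b, r, by simp [restF, h1, h2, hr]⟩

-- restF ignores its accumulator up to prepending it to the first body
theorem restF_acc (t : List String) : ∀ n c, restF t n c =
    match restF t n [] with
    | (m, b) :: r => (m, c ++ b) :: r
    | [] => [] := by
  induction t with
  | nil => intro n c; simp [restF]
  | cons l t ih =>
    intro n c
    by_cases h1 : PySem.Chars.startswith l.toList ['['] = true
    · simp [restF, h1]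
    · by_cases h2 : l = ""
      · subst h2
        rw [show restF ("" :: t) n c = restF t n c by simp [restF, startswith_nil_bracket],
            show restF ("" :: t) n [] = restF t n [] by simp [restF, startswith_nil_bracket]]
        exact ih n c
      · rw [show restF (l :: t) n c = restF t n (c ++ [l]) by simp [restF, h1, h2],
            show restF (l :: t) n [] = restF t n [l] by simp [restF, h1, h2],
            ih n (c ++ [l]), ih n [l]]
        obtain ⟨b, r, hr⟩ := restF_head t n []
        simp [hr]

theorem aFold_true (t : List String) : ∀ P C N,
    aFin (t.foldl aStep (P, C, N, true)) = P ++ restF t N C := by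
  induction t with
  | nil => intro P C N; simp [aFin, restF]
  | cons l t ih =>
    intro P C N
    by_cases h1 : PySem.Chars.startswith l.toList ['['] = true
    · simp [aStep, h1, restF, ih]
    · by_cases h2 : l = ""
      · simp [aStep, h2, restF, ih, startswith_nil_bracket]
      · simp [aStep, h1, h2, restF, ih]

theorem aFold_false (t : List String) : ∀ C,
    aFin (t.foldl aStep ([], C, "", false)) = preF t C := by
  induction t with
  | nil => intro C; simp [aFin, preF]
  | cons l t ih =>
    intro C
    by_cases h1 : PySem.Chars.startswith l.toList ['['] = true
    · simp [aStep, h1, preF, aFold_true]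
    · by_cases h2 : l = ""
      · simp [aStep, h2, preF, ih, startswith_nil_bracket]
      · simp [aStep, h1, h2, preF, ih]

-- bParse is exactly restF with an empty accumulator
theorem bEat_restF (ls : List String) : ∀ c n, restF ls n c =
    (match bEat c ls with
     | (b, []) => [(n, b)]
     | (b, h :: t) => (n, b) :: restF t h []) := by
  induction ls with
  | nil => intro c n; simp [restF, bEat]
  | cons l t ih =>
    intro c n
    by_cases h1 : PySem.Chars.startswith l.toList ['['] = true
    · simp [restF, bEat, PySem.Str.startswith, h1]
    · by_cases h2 : l = ""
      · simp [restF, bEat, PySem.Str.startswith, h2, startswith_nil_bracket, ih]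
      · simp [restF, bEat, PySem.Str.startswith, h1, h2, ih]

theorem bParse_unfold (name : String) (lines : List String) : bParse name lines =
    (match bEat [] lines with
     | (b, []) => [(name, b)]
     | (b, hd :: t) => (name, b) :: bParse hd t) := by
  rw [bParse]
  split
  · rename_i heq
    rw [heq]
  · rename_i heq
    rw [heq]

theorem bParse_eq_restF (n : String) (ls : List String) : bParse n ls = restF ls n [] := by
  induction n, ls using bParse.induct with
  | case1 name lines body h =>
    rw [bParse_unfold, bEat_restF lines [] name, h]
  | case2 name lines body hd t h ih =>
    rw [bParse_unfold, bEat_restF lines [] name, h]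
    simp [ih]

-- merging the leading chunk of restF gives preF
theorem merge_restF (ls : List String) : ∀ acc, bMerge (restF ls "" acc) = preF ls acc := by
  induction ls with
  | nil => intro acc; simp [restF, preF, bMerge]
  | cons l t ih =>
    intro acc
    by_cases h1 : PySem.Chars.startswith l.toList ['['] = true
    · rw [show restF (l :: t) "" acc = ("", acc) :: restF t l [] by simp [restF, h1],
          show preF (l :: t) acc = restF t l acc by simp [preF, h1]]
      obtain ⟨b, r, hr⟩ := restF_head t l []
      rw [hr, restF_acc t l acc, hr]
      simp [bMerge]
    · by_cases h2 : l = ""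
      · simp [restF, preF, h2, startswith_nil_bracket, ih]
      · simp [restF, preF, h1, h2, ih]

-- ===== VERDICT (by name: the statement is the Claim_ definition above) =====
theorem divide_song_into_paragraphs_spec : Claim_equal_divide_song_into_paragraphs := by
  intro song _
  show _ = _
  unfold divide_song_into_paragraphs divide_song_into_paragraphs_alt
  rw [aFold_false, PySem.List.foldl_append_if_eq_filter, bParse_eq_restF, merge_restF,
      List.nil_append]
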